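-- pv_equiv track=rewrite | github.com/MargotUCD/PhoneViz | source/automatic_speech_recognition.py | __clean_ipa
-- ===== SOURCE A (Python) =====
-- def __clean_ipa (phoneme_transcription):
--     phonemes = phoneme_transcription[0].split()
--     clean_phonemes = []
--     for pho in phonemes:
--         if len(pho)>1:
--             for p in pho:
--                 clean_phonemes.append(p)
--         else:
--             clean_phonemes.append(pho)
--     return [' '.join(p for p in clean_phonemes)]
-- ===== SOURCE B (Python) =====
-- def __clean_ipa(phoneme_transcription):
--     kept = [ch for ch in phoneme_transcription[0] if not ch.isspace()]
--     return [' '.join(kept)]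
-- ===== Notes on version B (the rewrite author's own statement) =====
-- stated objective: simpler
-- what changed: B drops the split()-then-expand-tokens pipeline entirely: it makes a single pass over the characters of phoneme_transcription[0], keeps the non-whitespace ones, and space-joins them.
import Mathlib
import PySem

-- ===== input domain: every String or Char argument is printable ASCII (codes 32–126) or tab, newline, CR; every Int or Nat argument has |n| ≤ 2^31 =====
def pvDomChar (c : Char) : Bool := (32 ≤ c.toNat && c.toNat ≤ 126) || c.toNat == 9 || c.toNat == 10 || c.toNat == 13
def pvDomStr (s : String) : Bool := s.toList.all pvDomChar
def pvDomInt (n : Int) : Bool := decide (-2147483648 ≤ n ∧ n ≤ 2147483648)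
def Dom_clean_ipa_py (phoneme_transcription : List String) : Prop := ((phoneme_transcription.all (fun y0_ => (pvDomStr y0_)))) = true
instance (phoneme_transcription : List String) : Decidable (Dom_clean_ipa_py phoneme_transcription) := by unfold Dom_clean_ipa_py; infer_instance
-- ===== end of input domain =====

-- B replaces A's split-then-expand-tokens pipeline by one filtered character pass (objective: simpler).

-- ===== PORT A =====
def clean_ipa_py (phoneme_transcription : List String) : List String :=
  match PySem.List.pyGet? phoneme_transcription 0 with
  | none => []   -- phoneme_transcription[0] raises IndexError; excluded by Pre_
  | some s =>
    let phonemes := PySem.Str.split₀ s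
    let clean_phonemes := phonemes.foldl (fun acc pho =>
      if PySem.Str.len pho > 1 then
        pho.toList.foldl (fun a p => a ++ [String.ofList [p]]) acc
      else acc ++ [pho]) []
    [PySem.Str.join " " clean_phonemes]

-- ===== PORT B =====
def clean_ipa_py_alt (phoneme_transcription : List String) : List String :=
  match PySem.List.pyGet? phoneme_transcription 0 with
  | none => []   -- phoneme_transcription[0] raises IndexError; excluded by Pre_
  | some s =>
    let kept := s.toList.filter (fun ch => !PySem.Str.isspace ch)
    [PySem.Str.join " " (kept.map (fun ch => String.ofList [ch]))]

-- ===== PRECONDITION & SPEC =====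
-- Pre_ excludes only the empty argument list, on which A raises IndexError.
def Pre_clean_ipa_py (phoneme_transcription : List String) : Prop := phoneme_transcription ≠ []
instance (phoneme_transcription : List String) : Decidable (Pre_clean_ipa_py phoneme_transcription) := by unfold Pre_clean_ipa_py; infer_instance
def pvWitness_clean_ipa_py : List String := ["tS a t"]

def Spec_clean_ipa_py (phoneme_transcription : List String) (out : List String) : Prop := out = clean_ipa_py_alt phoneme_transcription
instance (phoneme_transcription : List String) (out : List String) : Decidable (Spec_clean_ipa_py phoneme_transcription out) := by unfold Spec_clean_ipa_py; infer_instance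

-- ===== CLAIM (what is proved, stated in full; the proofs are below) =====
def Claim_equal_clean_ipa_py : Prop := ∀ (phoneme_transcription : List String), Dom_clean_ipa_py phoneme_transcription → Pre_clean_ipa_py phoneme_transcription → Spec_clean_ipa_py phoneme_transcription (clean_ipa_py phoneme_transcription)

-- ===== LEMMAS AND PROOFS =====

-- the concatenation of split()'s tokens is exactly the non-whitespace characters, in order
theorem pv_go_flatten (cs : List Char) : ∀ (cur : List Char) (acc : List (List Char)),
    (PySem.Chars.split₀.go cs cur acc).flatten
      = acc.reverse.flatten ++ cur.reverse ++ cs.filter (fun c => !PySem.Chars.isspace c) := by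
  induction cs with
  | nil =>
    intro cur acc
    by_cases h : cur = [] <;> simp [PySem.Chars.split₀.go, h]
  | cons c rest ih =>
    intro cur acc
    by_cases hs : PySem.Chars.isspace c
    · by_cases h : cur = [] <;> simp [PySem.Chars.split₀.go, hs, h, ih]
    · simp [PySem.Chars.split₀.go, hs, ih]

theorem pv_split₀_flatten (cs : List Char) :
    (PySem.Chars.split₀ cs).flatten = cs.filter (fun c => !PySem.Chars.isspace c) := by
  simpa [PySem.Chars.split₀] using pv_go_flatten cs [] []

-- split() never produces an empty token
theorem pv_go_ne_nil (cs : List Char) : ∀ (cur : List Char) (acc : List (List Char)),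
    (∀ t ∈ acc, t ≠ []) → ∀ t ∈ PySem.Chars.split₀.go cs cur acc, t ≠ [] := by
  induction cs with
  | nil =>
    intro cur acc hacc t ht
    by_cases h : cur = []
    · simp [PySem.Chars.split₀.go, h] at ht
      exact hacc t ht
    · simp [PySem.Chars.split₀.go, h] at ht
      rcases ht with ht | ht
      · exact hacc t ht
      · simpa [ht] using h
  | cons c rest ih =>
    intro cur acc hacc t ht
    by_cases hs : PySem.Chars.isspace c
    · by_cases h : cur = []
      · exact ih [] acc hacc t (by simpa [PySem.Chars.split₀.go, hs, h] using ht)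
      · refine ih [] (cur.reverse :: acc) ?_ t (by simpa [PySem.Chars.split₀.go, hs, h] using ht)
        intro u hu
        rcases List.mem_cons.mp hu with hu | hu
        · simpa [hu] using h
        · exact hacc u hu
    · exact ih (c :: cur) acc hacc t (by simpa [PySem.Chars.split₀.go, hs] using ht)

theorem pv_split₀_ne_nil (cs : List Char) : ∀ t ∈ PySem.Chars.split₀ cs, t ≠ [] :=
  pv_go_ne_nil cs [] [] (by simp)

-- A's token loop, in closed form: it emits one length-1 string per character of each token
theorem pv_fold_expand (ts : List String) : ∀ init : List String, (∀ t ∈ ts, t.toList ≠ []) →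
    ts.foldl (fun acc pho =>
        if PySem.Str.len pho > 1 then
          pho.toList.foldl (fun a p => a ++ [String.ofList [p]]) acc
        else acc ++ [pho]) init
      = init ++ ((ts.map String.toList).flatten).map (fun c => String.ofList [c]) := by
  induction ts with
  | nil => intro init _; simp
  | cons t ts ih =>
    intro init hne
    have hts : ∀ u ∈ ts, u.toList ≠ [] := fun u hu => hne u (List.mem_cons_of_mem _ hu)
    by_cases hlen : PySem.Str.len t > 1
    · simp only [List.foldl_cons, if_pos hlen,
        PySem.List.foldl_append_singleton_eq_map (fun p => String.ofList [p]) t.toList init,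
        ih _ hts]
      simp
    · have h1 : t.toList.length = 1 := by
        have h0 : t.toList ≠ [] := hne t (List.mem_cons_self)
        have := List.length_pos_of_ne_nil h0
        simp only [PySem.Str.len] at hlen
        omega
      obtain ⟨c, hc⟩ := List.length_eq_one_iff.mp h1
      have hts' : t = String.ofList [c] := by
        rw [← hc, String.ofList_toList]
      simp only [List.foldl_cons, if_neg hlen, ih _ hts]
      simp [hts']

theorem pv_pyGet?_cons_zero (x : String) (xs : List String) :
    PySem.List.pyGet? (x :: xs) (0 : Int) = some x := by
  simp [PySem.List.pyGet?, PySem.List.pyIdx?]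

theorem pv_branch (s : String) :
    PySem.Str.join " " ((PySem.Str.split₀ s).foldl (fun acc pho =>
        if PySem.Str.len pho > 1 then
          pho.toList.foldl (fun a p => a ++ [String.ofList [p]]) acc
        else acc ++ [pho]) [])
      = PySem.Str.join " "
          ((s.toList.filter (fun ch => !PySem.Str.isspace ch)).map (fun ch => String.ofList [ch])) := by
  have hne : ∀ t ∈ PySem.Str.split₀ s, t.toList ≠ [] := by
    intro t ht
    simp only [PySem.Str.split₀, List.mem_map] at ht
    obtain ⟨u, hu, rfl⟩ := ht
    simpa [String.toList_ofList] using pv_split₀_ne_nil s.toList u hu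
  rw [pv_fold_expand _ _ hne]
  have hmap : (PySem.Str.split₀ s).map String.toList = PySem.Chars.split₀ s.toList := by
    simp [PySem.Str.split₀, List.map_map, Function.comp_def, String.toList_ofList]
  rw [List.nil_append, hmap, pv_split₀_flatten]
  rfl

-- ===== VERDICT (by name: the statement is the Claim_ definition above) =====
theorem clean_ipa_py_spec : Claim_equal_clean_ipa_py := by
  intro pt _ hpre
  cases pt with
  | nil => exact absurd rfl hpre
  | cons s rest =>
    show clean_ipa_py (s :: rest) = clean_ipa_py_alt (s :: rest)
    simp only [clean_ipa_py, clean_ipa_py_alt, pv_pyGet?_cons_zero]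
    exact congrArg (fun x => [x]) (pv_branch s)
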